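-- pv_equiv track=rewrite | github.com/SirCypkowskyy/ntfy-discord-bridge | app/discord.py | _check_tags_for_type
-- ===== SOURCE A (Python) =====
-- COLOR_SUCCESS = 3066993  # Green
--
-- COLOR_WARNING = 16776960  # Yellow
--
-- COLOR_ERROR = 15158332  # Red
--
-- EMOJI_SUCCESS = "✅"
--
-- EMOJI_WARNING = "⚠️"
--
-- EMOJI_ERROR = "❌"
--
-- ERROR_TAGS = {"error", "skull", "rotating_light", "fire", "boom"}
--
-- WARNING_TAGS = {"warning", "exclamation", "construction"}
--
-- SUCCESS_TAGS = {
--     "white_check_mark",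
--     "heavy_check_mark",
--     "partying_face",
--     "tada",
--     "check",
-- }
--
-- def _check_tags_for_type(tags_lower: list[str]) -> tuple[int, str] | None:
--     """Check if tags indicate a specific notification type.
--
--     Args:
--         tags_lower: Lowercase list of tags.
--
--     Returns:
--         Tuple of (color, emoji) if tags match a type, None otherwise.
--
--     """
--     if any(tag in tags_lower for tag in ERROR_TAGS):
--         return (COLOR_ERROR, EMOJI_ERROR)
--     if any(tag in tags_lower for tag in WARNING_TAGS):
--         return (COLOR_WARNING, EMOJI_WARNING)
--     if any(tag in tags_lower for tag in SUCCESS_TAGS):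
--         return (COLOR_SUCCESS, EMOJI_SUCCESS)
--     return None
-- ===== SOURCE B (Python) =====
-- COLOR_SUCCESS = 3066993  # Green
-- COLOR_WARNING = 16776960  # Yellow
-- COLOR_ERROR = 15158332  # Red
--
-- EMOJI_SUCCESS = "\u2705"
-- EMOJI_WARNING = "\u26a0\ufe0f"
-- EMOJI_ERROR = "\u274c"
--
-- # one table: tag -> category rank (0 = error, 1 = warning, 2 = success)
-- _RANK = {
--     "error": 0,
--     "skull": 0,
--     "rotating_light": 0,
--     "fire": 0,
--     "boom": 0,
--     "warning": 1,
--     "exclamation": 1,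
--     "construction": 1,
--     "white_check_mark": 2,
--     "heavy_check_mark": 2,
--     "partying_face": 2,
--     "tada": 2,
--     "check": 2,
-- }
--
-- _RESULTS = (
--     (COLOR_ERROR, EMOJI_ERROR),
--     (COLOR_WARNING, EMOJI_WARNING),
--     (COLOR_SUCCESS, EMOJI_SUCCESS),
-- )
--
--
-- def _check_tags_for_type(tags_lower: "list[str]") -> "tuple[int, str] | None":
--     best = None
--     for tag in tags_lower:
--         r = _RANK.get(tag)
--         if r is not None and (best is None or r < best):
--             best = r
--     if best is None:
--         return None
--     return _RESULTS[best]
-- ===== Notes on version B (the rewrite author's own statement) =====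
-- stated objective: faster
-- what changed: Replaces three ordered membership scans over tags_lower (one per tag category) with a single pass that looks each tag up in one precomputed rank dict and keeps the minimum rank, mapping the best rank to its (color, emoji) pair afterwards.
import Mathlib
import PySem

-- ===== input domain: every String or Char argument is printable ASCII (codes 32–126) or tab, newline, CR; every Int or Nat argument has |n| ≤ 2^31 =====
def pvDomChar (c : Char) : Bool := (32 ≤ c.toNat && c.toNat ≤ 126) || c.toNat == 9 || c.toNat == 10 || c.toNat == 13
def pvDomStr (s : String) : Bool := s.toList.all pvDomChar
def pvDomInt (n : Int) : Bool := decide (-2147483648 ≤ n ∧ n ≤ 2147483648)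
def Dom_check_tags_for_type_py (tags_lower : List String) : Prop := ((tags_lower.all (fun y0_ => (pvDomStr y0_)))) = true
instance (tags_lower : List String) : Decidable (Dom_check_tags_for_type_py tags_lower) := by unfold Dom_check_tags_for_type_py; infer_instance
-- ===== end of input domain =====

-- B replaces A's three ordered category membership scans by one rank-table pass keeping the minimum rank (measured faster by a constant factor).

-- ===== PORT A =====
def errorTags : List String := ["error", "skull", "rotating_light", "fire", "boom"]
def warningTags : List String := ["warning", "exclamation", "construction"]
def successTags : List String := ["white_check_mark", "heavy_check_mark", "partying_face", "tada", "check"]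

def check_tags_for_type_py (tags_lower : List String) : Option (Int × String) :=
  if errorTags.any (fun tag => tags_lower.contains tag) then some (15158332, "❌")
  else if warningTags.any (fun tag => tags_lower.contains tag) then some (16776960, "⚠️")
  else if successTags.any (fun tag => tags_lower.contains tag) then some (3066993, "✅")
  else none

-- ===== PORT B =====
def rankDict : PySem.Dict String Int :=
  PySem.Dict.ofList [("error", 0), ("skull", 0), ("rotating_light", 0), ("fire", 0), ("boom", 0),
    ("warning", 1), ("exclamation", 1), ("construction", 1),
    ("white_check_mark", 2), ("heavy_check_mark", 2), ("partying_face", 2), ("tada", 2), ("check", 2)]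

-- loop body of B: keep the smallest rank seen so far
def rankStep (best : Option Int) (tag : String) : Option Int :=
  match rankDict.get? tag with
  | none => best
  | some r =>
    match best with
    | none => some r
    | some b => if r < b then some r else some b

def check_tags_for_type_py_alt (tags_lower : List String) : Option (Int × String) :=
  match tags_lower.foldl rankStep none with
  | none => none
  | some r =>
    -- _RESULTS[best]
    if r == 0 then some (15158332, "❌")
    else if r == 1 then some (16776960, "⚠️")
    else some (3066993, "✅")

-- ===== PRECONDITION & SPEC =====
def Spec_check_tags_for_type_py (tags_lower : List String) (out : Option (Int × String)) : Prop := out = check_tags_for_type_py_alt tags_lower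
instance (tags_lower : List String) (out : Option (Int × String)) : Decidable (Spec_check_tags_for_type_py tags_lower out) := by unfold Spec_check_tags_for_type_py; infer_instance

-- ===== CLAIM (what is proved, stated in full; the proofs are below) =====
def Claim_equal_check_tags_for_type_py : Prop := ∀ (tags_lower : List String), Dom_check_tags_for_type_py tags_lower → Spec_check_tags_for_type_py tags_lower (check_tags_for_type_py tags_lower)

-- ===== LEMMAS AND PROOFS =====

def omin (a b : Option Int) : Option Int :=
  match a, b with
  | none, b => b
  | some x, none => some x
  | some x, some y => if y < x then some y else some x

lemma rankStep_eq_omin (best : Option Int) (tag : String) :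
    rankStep best tag = omin best (rankDict.get? tag) := by
  cases h : rankDict.get? tag <;> cases best <;> simp [rankStep, omin, h]

lemma omin_some_some (x y : Int) : omin (some x) (some y) = some (min x y) := by
  simp only [omin]; split_ifs <;> simp <;> omega

lemma omin_none_right (a : Option Int) : omin a none = a := by cases a <;> rfl

lemma omin_assoc (a b c : Option Int) : omin (omin a b) c = omin a (omin b c) := by
  cases c with
  | none => rw [omin_none_right, omin_none_right]
  | some z =>
    cases b with
    | none => rw [omin_none_right]; rfl
    | some y =>
      cases a with
      | none => rfl
      | some x => rw [omin_some_some, omin_some_some, omin_some_some, omin_some_some, min_assoc]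

lemma foldl_rankStep_eq (xs : List String) (acc : Option Int) :
    xs.foldl rankStep acc = omin acc (xs.foldl rankStep none) := by
  induction xs generalizing acc with
  | nil => cases acc <;> simp [omin]
  | cons t xs ih =>
    simp only [List.foldl_cons]
    rw [ih (rankStep acc t), ih (rankStep none t), rankStep_eq_omin,
      rankStep_eq_omin none t, omin_assoc]
    rfl

lemma rank_get (t : String) :
    rankDict.get? t = (if t ∈ errorTags then some 0
      else if t ∈ warningTags then some (1 : Int)
      else if t ∈ successTags then some 2 else none) := by
  have hitems : rankDict.items = [("error", 0), ("skull", 0), ("rotating_light", 0),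
      ("fire", 0), ("boom", 0), ("warning", 1), ("exclamation", 1), ("construction", 1),
      ("white_check_mark", 2), ("heavy_check_mark", 2), ("partying_face", 2),
      ("tada", 2), ("check", 2)] := by decide
  split_ifs with h1 h2 h3
  · simp only [errorTags, List.mem_cons, List.not_mem_nil, or_false] at h1
    rcases h1 with rfl | rfl | rfl | rfl | rfl <;> decide
  · simp only [warningTags, List.mem_cons, List.not_mem_nil, or_false] at h2
    rcases h2 with rfl | rfl | rfl <;> decide
  · simp only [successTags, List.mem_cons, List.not_mem_nil, or_false] at h3
    rcases h3 with rfl | rfl | rfl | rfl | rfl <;> decide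
  · simp only [errorTags, warningTags, successTags, List.mem_cons,
      List.not_mem_nil, or_false, not_or] at h1 h2 h3
    simp only [PySem.Dict.get?, hitems, List.find?]
    repeat' split <;> simp_all

lemma exists_mem_cons_iff (t : String) (xs : List String)
    (ys : List String) :
    (∃ tag ∈ ys, tag ∈ t :: xs) ↔ (t ∈ ys ∨ ∃ tag ∈ ys, tag ∈ xs) := by
  simp only [List.mem_cons]
  constructor
  · rintro ⟨a, ha, rfl | h⟩
    · exact Or.inl ha
    · exact Or.inr ⟨a, ha, h⟩
  · rintro (h | ⟨a, ha, h⟩)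
    · exact ⟨t, h, Or.inl rfl⟩
    · exact ⟨a, ha, Or.inr h⟩

lemma minRank_char (xs : List String) :
    xs.foldl rankStep none =
      (if ∃ tag ∈ errorTags, tag ∈ xs then some 0
       else if ∃ tag ∈ warningTags, tag ∈ xs then some (1 : Int)
       else if ∃ tag ∈ successTags, tag ∈ xs then some 2 else none) := by
  induction xs with
  | nil => simp
  | cons t xs ih =>
    simp only [List.foldl_cons]
    rw [foldl_rankStep_eq, ih, rankStep_eq_omin, rank_get,
      if_congr (exists_mem_cons_iff t xs errorTags) rfl rfl,
      if_congr (exists_mem_cons_iff t xs warningTags) rfl rfl,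
      if_congr (exists_mem_cons_iff t xs successTags) rfl rfl]
    split_ifs <;> simp_all [omin] <;> tauto

-- ===== VERDICT (by name: the statement is the Claim_ definition above) =====
theorem check_tags_for_type_py_spec : Claim_equal_check_tags_for_type_py := by
  intro xs _
  unfold Spec_check_tags_for_type_py check_tags_for_type_py check_tags_for_type_py_alt
  rw [minRank_char]
  have he : (errorTags.any (fun tag => xs.contains tag) = true) ↔
      ∃ tag ∈ errorTags, tag ∈ xs := by simp
  have hw : (warningTags.any (fun tag => xs.contains tag) = true) ↔
      ∃ tag ∈ warningTags, tag ∈ xs := by simp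
  have hs : (successTags.any (fun tag => xs.contains tag) = true) ↔
      ∃ tag ∈ successTags, tag ∈ xs := by simp
  split_ifs with h1 h2 h3 <;> simp_all
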